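-- pv_equiv track=rewrite | github.com/TedBarbier/CryptInsa | backend/cryptage/mapping.py | generer_pattern
-- ===== SOURCE A (Python) =====
-- def generer_pattern(mot):
--     mapping = {}
--     compteur = 1
--     pattern = []
--     for lettre in mot:
--         if lettre not in mapping:
--             mapping[lettre] = compteur
--             compteur += 1
--         pattern.append(str(mapping[lettre]))
--     return "".join(pattern)
-- ===== SOURCE B (Python) =====
-- def generer_pattern(mot):
--     # Rank of each letter = number of distinct letters in the prefix of mot
--     # ending at that letter's first occurrence; no mapping/counter is maintained.
--     return "".join(str(len(set(mot[:mot.index(l) + 1]))) for l in mot)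
-- ===== Notes on version B (the rewrite author's own statement) =====
-- stated objective: alternative
-- what changed: A's stateful single pass (dict + incrementing counter) is replaced by a stateless arithmetic characterisation: each letter's rank is computed independently as the number of distinct letters in the prefix ending at that letter's first occurrence (set-cardinality of mot[:mot.index(l)+1]), with no mapping or counter maintained.
import Mathlib
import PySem

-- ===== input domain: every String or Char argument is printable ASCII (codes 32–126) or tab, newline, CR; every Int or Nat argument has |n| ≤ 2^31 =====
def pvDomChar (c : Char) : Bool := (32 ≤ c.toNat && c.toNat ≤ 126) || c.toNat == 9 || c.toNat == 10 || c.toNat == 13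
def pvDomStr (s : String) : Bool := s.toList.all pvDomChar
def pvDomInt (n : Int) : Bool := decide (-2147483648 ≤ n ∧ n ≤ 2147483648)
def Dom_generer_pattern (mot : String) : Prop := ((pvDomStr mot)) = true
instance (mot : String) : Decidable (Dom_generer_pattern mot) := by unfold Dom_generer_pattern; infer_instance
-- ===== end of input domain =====

-- B drops A's dict/counter state entirely: each letter's rank is computed arithmetically as the
-- number of distinct letters in the prefix ending at that letter's first occurrence (alternative).

-- ===== PORT A =====
-- loop body: if lettre not in mapping: mapping[lettre] = compteur; compteur += 1
--            pattern.append(str(mapping[lettre]))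
def pvStepA (st : PySem.Dict Char Int × Int × List String) (lettre : Char) :
    PySem.Dict Char Int × Int × List String :=
  let st2 :=
    if st.1.contains lettre = false then (st.1.insert lettre st.2.1, st.2.1 + 1, st.2.2)
    else st
  (st2.1, st2.2.1, st2.2.2 ++ [PySem.Int.toStr (st2.1.getD lettre 0)])

def generer_pattern (mot : String) : String :=
  -- mapping = {}; compteur = 1; pattern = [];  for lettre in mot: …;  return "".join(pattern)
  let st := mot.toList.foldl pvStepA (PySem.Dict.empty, 1, [])
  PySem.Str.join "" st.2.2

-- ===== PORT B =====
def generer_pattern_alt (mot : String) : String :=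
  -- "".join(str(len(set(mot[:mot.index(l) + 1]))) for l in mot)
  -- mot.index(l) is the first index of char l (l always occurs, so getD 0 is never the default);
  -- the slice mot[:k+1] with k ≥ 0 is exactly take (k+1); set(...) is PySem.Set.ofList.
  PySem.Str.join "" (mot.toList.map (fun l =>
    PySem.Int.toStr ((((PySem.Set.ofList
      (mot.toList.take (((PySem.List.index? mot.toList l).getD 0) + 1))).length : Nat) : Int))))

-- ===== PRECONDITION & SPEC =====
def Spec_generer_pattern (mot : String) (out : String) : Prop := out = generer_pattern_alt mot
instance (mot : String) (out : String) : Decidable (Spec_generer_pattern mot out) := by unfold Spec_generer_pattern; infer_instance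

-- ===== CLAIM (what is proved, stated in full; the proofs are below) =====
def Claim_equal_generer_pattern : Prop := ∀ (mot : String), Dom_generer_pattern mot → Spec_generer_pattern mot (generer_pattern mot)

-- ===== LEMMAS AND PROOFS =====

-- 1-based first-occurrence rank of a letter among a list of distinct seen letters (0 if unseen: never used there)
def pvRank (ds : List Char) (l : Char) : Int :=
  match PySem.List.index? ds l with
  | some k => (k : Int) + 1
  | none => 0

-- the ranks A emits, letter by letter, extending the seen list as it goes
def pvRanks : List Char → List Char → List Int
  | _, [] => []
  | ds, l :: rest =>
    if l ∈ ds then pvRank ds l :: pvRanks ds rest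
    else ((ds.length : Int) + 1) :: pvRanks (ds ++ [l]) rest

theorem pvStepA_old (d : PySem.Dict Char Int) (c : Int) (acc : List String) (l : Char)
    (h : d.contains l = true) :
    pvStepA (d, c, acc) l = (d, c, acc ++ [PySem.Int.toStr (d.getD l 0)]) := by
  simp [pvStepA, h]

theorem pvStepA_new (d : PySem.Dict Char Int) (c : Int) (acc : List String) (l : Char)
    (h : d.contains l = false) :
    pvStepA (d, c, acc) l = (d.insert l c, c + 1, acc ++ [PySem.Int.toStr c]) := by
  simp [pvStepA, h, PySem.Dict.getD_insert_self]

-- A's fold emits exactly pvRanks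
theorem pvA_fold (rest : List Char) : ∀ (ds : List Char) (d : PySem.Dict Char Int)
    (acc : List String),
    (∀ l, d.contains l = decide (l ∈ ds)) →
    (∀ l ∈ ds, d.getD l 0 = pvRank ds l) →
    (rest.foldl pvStepA (d, (ds.length : Int) + 1, acc)).2.2
      = acc ++ (pvRanks ds rest).map PySem.Int.toStr := by
  induction rest with
  | nil => intro ds d acc _ _; simp [pvRanks]
  | cons l rest ih =>
    intro ds d acc hc hg
    by_cases hm : l ∈ ds
    · have hcl : d.contains l = true := by rw [hc]; simp [hm]
      rw [List.foldl_cons, pvStepA_old _ _ _ _ hcl,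
        ih ds d _ hc hg, pvRanks, if_pos hm, hg l hm]
      simp
    · have hcl : d.contains l = false := by rw [hc]; simp [hm]
      rw [List.foldl_cons, pvStepA_new _ _ _ _ hcl]
      have hc' : ∀ l', (d.insert l ((ds.length : Int) + 1)).contains l'
          = decide (l' ∈ ds ++ [l]) := by
        intro l'
        rw [PySem.Dict.contains_insert, hc]
        by_cases h' : l' = l <;> simp [h']
      have hg' : ∀ l' ∈ ds ++ [l], (d.insert l ((ds.length : Int) + 1)).getD l' 0
          = pvRank (ds ++ [l]) l' := by
        intro l' hl'
        rcases List.mem_append.1 hl' with h' | h'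
        · have hne : l' ≠ l := fun e => hm (e ▸ h')
          rw [PySem.Dict.getD_insert_of_ne _ _ _ hne, hg l' h', pvRank, pvRank,
            PySem.List.index?_append_of_mem _ h']
        · have e : l' = l := by simpa using h'
          subst e
          rw [PySem.Dict.getD_insert_self, pvRank,
            PySem.List.index?_append_singleton_self _ _ hm]
      have hlen : ((ds ++ [l]).length : Int) + 1 = ((ds.length : Int) + 1) + 1 := by
        simp
      rw [show ((ds.length : Int) + 1) + 1 = ((ds ++ [l]).length : Int) + 1 from hlen.symm,
        ih (ds ++ [l]) _ _ hc' hg', pvRanks, if_neg hm]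
      simp

-- Set.update only appends to its first argument
theorem pvUpdate_prefix (w : List Char) : ∀ ds : List Char,
    ∃ t, PySem.Set.update ds w = ds ++ t := by
  induction w with
  | nil =>
    intro ds
    refine ⟨[], ?_⟩
    have h0 : PySem.Set.update ds [] = ds := rfl
    rw [h0, List.append_nil]
  | cons l w ih =>
    intro ds
    rw [PySem.Set.update_cons]
    by_cases hm : l ∈ ds
    · have : PySem.Set.add ds l = ds := by
        unfold PySem.Set.add PySem.Set.contains; simp [hm]
      rw [this]; exact ih ds
    · have : PySem.Set.add ds l = ds ++ [l] := by
        unfold PySem.Set.add PySem.Set.contains; simp [hm]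
      rw [this]
      obtain ⟨t, ht⟩ := ih (ds ++ [l])
      exact ⟨[l] ++ t, by rw [ht]; simp⟩

-- ranks relative to the growing seen list = ranks relative to the final distinct list
theorem pvRanks_eq (w : List Char) : ∀ ds : List Char, ds.Nodup →
    pvRanks ds w = w.map (fun l => pvRank (PySem.Set.update ds w) l) := by
  induction w with
  | nil => intro ds _; simp [pvRanks]
  | cons l w ih =>
    intro ds hnd
    rw [PySem.Set.update_cons]
    by_cases hm : l ∈ ds
    · have ha : PySem.Set.add ds l = ds := by
        unfold PySem.Set.add PySem.Set.contains; simp [hm]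
      rw [ha, pvRanks, if_pos hm, ih ds hnd, List.map_cons]
      obtain ⟨t, ht⟩ := pvUpdate_prefix w ds
      rw [ht, pvRank, pvRank, PySem.List.index?_append_of_mem _ hm]
    · have ha : PySem.Set.add ds l = ds ++ [l] := by
        unfold PySem.Set.add PySem.Set.contains; simp [hm]
      have hnd' : (ds ++ [l]).Nodup := by
        refine List.Nodup.append hnd (List.nodup_singleton l) ?_
        intro a ha hb
        rw [List.mem_singleton] at hb
        exact hm (hb ▸ ha)
      rw [ha, pvRanks, if_neg hm, ih (ds ++ [l]) hnd', List.map_cons]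
      obtain ⟨t, ht⟩ := pvUpdate_prefix w (ds ++ [l])
      have hidx : PySem.List.index? (ds ++ [l] ++ t) l = some ds.length := by
        rw [PySem.List.index?_append_of_mem _ (by simp : l ∈ ds ++ [l]),
          PySem.List.index?_append_singleton_self _ _ hm]
      rw [ht, pvRank, hidx]

-- B's per-letter count equals the first-occurrence rank in the deduplicated word
theorem pvB_count (w : List Char) (l : Char) (hm : l ∈ w) :
    ((PySem.Set.ofList (w.take (((PySem.List.index? w l).getD 0) + 1))).length : Int)
      = pvRank (PySem.List.dedup w) l := by
  obtain ⟨k, hk⟩ := Option.isSome_iff_exists.1 ((PySem.List.index?_isSome_iff _ _).2 hm)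
  obtain ⟨p, suf, hw, hlen, hnp⟩ := (PySem.List.index?_eq_some_iff _ _ _).1 hk
  subst hw hlen
  have htake : (p ++ l :: suf).take (p.length + 1) = p ++ [l] := by
    rw [show p.length + 1 = p.length + 1 from rfl, List.take_append]
    simp
  have hofp : PySem.Set.ofList (p ++ [l]) = PySem.List.dedup p ++ [l] := by
    rw [show PySem.Set.ofList (p ++ [l]) = PySem.Set.update (PySem.Set.ofList p) [l] from by
        simp [PySem.Set.ofList_eq_foldl, PySem.Set.update, List.foldl_append]]
    have hnl : l ∉ PySem.Set.ofList p := by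
      rw [← PySem.List.dedup_eq_ofList, PySem.List.mem_dedup]; exact hnp
    simp [PySem.Set.update, PySem.Set.add, PySem.Set.contains, hnl,
      PySem.List.dedup_eq_ofList]
  have hdedup : ∃ t, PySem.List.dedup (p ++ l :: suf) = PySem.List.dedup p ++ [l] ++ t := by
    have h1 : PySem.List.dedup (p ++ l :: suf)
        = PySem.Set.update (PySem.Set.ofList (p ++ [l])) suf := by
      rw [PySem.List.dedup_eq_ofList]
      simp [PySem.Set.ofList_eq_foldl, PySem.Set.update, List.foldl_append]
    obtain ⟨t, ht⟩ := pvUpdate_prefix suf (PySem.Set.ofList (p ++ [l]))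
    exact ⟨t, by rw [h1, ht, hofp]⟩
  obtain ⟨t, ht⟩ := hdedup
  have hnl : l ∉ PySem.List.dedup p := by rw [PySem.List.mem_dedup]; exact hnp
  have hidx : PySem.List.index? (PySem.List.dedup (p ++ l :: suf)) l
      = some (PySem.List.dedup p).length := by
    rw [ht, PySem.List.index?_append_of_mem _ (by simp : l ∈ PySem.List.dedup p ++ [l]),
      PySem.List.index?_append_singleton_self _ _ hnl]
  rw [hk, pvRank, hidx]
  simp only [Option.getD_some, htake, hofp]
  simp

-- ===== VERDICT (by name: the statement is the Claim_ definition above) =====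
theorem generer_pattern_spec : Claim_equal_generer_pattern := by
  intro mot _
  unfold Spec_generer_pattern
  change PySem.Str.join "" (mot.toList.foldl pvStepA (PySem.Dict.empty, 1, [])).2.2
      = PySem.Str.join "" (mot.toList.map (fun l =>
          PySem.Int.toStr ((((PySem.Set.ofList
            (mot.toList.take (((PySem.List.index? mot.toList l).getD 0) + 1))).length : Nat) : Int))))
  have hA := pvA_fold mot.toList [] PySem.Dict.empty []
    (by intro l; simp [PySem.Dict.contains_empty]) (by intro l h; simp at h)
  simp only [List.length_nil, Nat.cast_zero, zero_add] at hA
  rw [hA]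
  congr 1
  rw [pvRanks_eq mot.toList [] List.nodup_nil]
  have hupd : PySem.Set.update [] mot.toList = PySem.List.dedup mot.toList := by
    simp [PySem.Set.update_nil_left]
  rw [List.map_map, hupd]
  apply List.map_congr_left
  intro l hl
  rw [Function.comp_apply, pvB_count mot.toList l hl]
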